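-- pv_equiv track=rewrite | github.com/dazyyey2/1DV505 | Assignment1/Lecture1/pascal.py | pascal_rec
-- ===== SOURCE A (Python) =====
-- def pascal_rec(lst, n):
--     if n == 0:
--         return lst
--     new_line = [1]
--     for i in range(0, len(lst)-1):
--         new_line.append(lst[i] + lst[i+1])
--     new_line.append(1)
--     return pascal_rec(new_line, n-1)
-- ===== SOURCE B (Python) =====
-- def pascal_rec(lst, n):
--     cur = lst
--     while n != 0:
--         cur = [1] + [cur[i] + cur[i + 1] for i in range(len(cur) - 1)] + [1]
--         n -= 1
--     return cur
-- ===== Notes on version B (the rewrite author's own statement) =====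
-- stated objective: simpler
-- what changed: Replaces the recursion (building each new row with an explicit append loop) by a flat iterative while-loop that rebuilds the row with a single comprehension each round.
import Mathlib
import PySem

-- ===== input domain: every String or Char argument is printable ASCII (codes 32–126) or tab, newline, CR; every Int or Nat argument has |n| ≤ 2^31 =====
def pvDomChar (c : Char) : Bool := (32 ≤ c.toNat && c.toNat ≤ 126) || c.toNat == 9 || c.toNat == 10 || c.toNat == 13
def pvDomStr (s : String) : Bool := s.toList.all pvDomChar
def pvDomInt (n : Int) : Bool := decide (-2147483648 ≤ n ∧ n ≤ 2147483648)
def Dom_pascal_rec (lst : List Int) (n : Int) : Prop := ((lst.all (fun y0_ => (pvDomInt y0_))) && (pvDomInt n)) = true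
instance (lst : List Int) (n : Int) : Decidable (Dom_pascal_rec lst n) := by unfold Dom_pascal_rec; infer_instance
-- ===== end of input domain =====

-- B replaces A's recursion (append-loop per row) by an iterative loop building each row with a comprehension; return values proved equal for n ≥ 0.

-- ===== PORT A =====
-- new_line = [1]; for i in range(0, len(lst)-1): new_line.append(lst[i]+lst[i+1]); new_line.append(1)
def pascalStepA (lst : List Int) : List Int :=
  ((PySem.List.pyRange 0 ((lst.length : Int) - 1) 1).foldl
    (fun acc i => acc ++ [PySem.List.pyGetD lst i 0 + PySem.List.pyGetD lst (i + 1) 0]) [1]) ++ [1]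

def pascal_rec (lst : List Int) (n : Int) : List Int :=
  if n = 0 then lst
  else if n < 0 then lst   -- totality guard: Python A recurses forever (RecursionError) here; outside Pre_
  else pascal_rec (pascalStepA lst) (n - 1)
termination_by n.toNat
decreasing_by omega

-- ===== PORT B =====
-- cur = [1] + [cur[i] + cur[i+1] for i in range(len(cur)-1)] + [1]
def pascalStepB (cur : List Int) : List Int :=
  1 :: ((PySem.List.pyRange 0 ((cur.length : Int) - 1) 1).map
    (fun i => PySem.List.pyGetD cur i 0 + PySem.List.pyGetD cur (i + 1) 0)) ++ [1]

-- while n != 0: … ; n -= 1   — for n ≥ 0 this runs exactly n.toNat times (n < 0 never terminates, outside Pre_)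
def pascalLoopB : List Int → Nat → List Int
  | cur, 0 => cur
  | cur, k + 1 => pascalLoopB (pascalStepB cur) k

def pascal_rec_alt (lst : List Int) (n : Int) : List Int :=
  pascalLoopB lst n.toNat

-- ===== PRECONDITION & SPEC =====
-- Pre_ excludes n < 0, on which Python A never returns (unbounded recursion → RecursionError).
def Pre_pascal_rec (lst : List Int) (n : Int) : Prop := 0 ≤ n
instance (lst : List Int) (n : Int) : Decidable (Pre_pascal_rec lst n) := by unfold Pre_pascal_rec; infer_instance
def pvWitness_pascal_rec : List Int × Int := ([1, 2, 1], 2)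

def Spec_pascal_rec (lst : List Int) (n : Int) (out : List Int) : Prop := out = pascal_rec_alt lst n
instance (lst : List Int) (n : Int) (out : List Int) : Decidable (Spec_pascal_rec lst n out) := by unfold Spec_pascal_rec; infer_instance

-- ===== CLAIM (what is proved, stated in full; the proofs are below) =====
def Claim_equal_pascal_rec : Prop := ∀ (lst : List Int) (n : Int), Dom_pascal_rec lst n → Pre_pascal_rec lst n → Spec_pascal_rec lst n (pascal_rec lst n)

-- ===== LEMMAS AND PROOFS =====
theorem pascalStep_eq (lst : List Int) : pascalStepA lst = pascalStepB lst := by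
  unfold pascalStepA pascalStepB
  rw [PySem.List.foldl_append_singleton_eq_map]
  simp

theorem pascal_rec_natCast (k : Nat) (lst : List Int) :
    pascal_rec lst (k : Int) = pascalLoopB lst k := by
  induction k generalizing lst with
  | zero => simp [pascal_rec, pascalLoopB]
  | succ m ih =>
      rw [pascal_rec, pascalLoopB]
      have h0 : ((m + 1 : Nat) : Int) ≠ 0 := by omega
      have h1 : ¬ ((m + 1 : Nat) : Int) < 0 := by omega
      have h2 : ((m + 1 : Nat) : Int) - 1 = (m : Int) := by omega
      rw [if_neg h0, if_neg h1, h2, pascalStep_eq, ih]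

-- ===== VERDICT (by name: the statement is the Claim_ definition above) =====
theorem pascal_rec_spec : Claim_equal_pascal_rec := by
  intro lst n _ hpre
  unfold Spec_pascal_rec pascal_rec_alt
  have hn : n = (n.toNat : Int) := by unfold Pre_pascal_rec at hpre; omega
  rw [hn, pascal_rec_natCast, Int.toNat_natCast]
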